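-- pv_equiv track=rewrite | github.com/imhireki/discord-settings | tests/test_api/test_client.py | dict_items_in_dict
-- ===== SOURCE A (Python) =====
-- def dict_items_in_dict(dict_a: dict, dict_b: dict):
--     match_items = dict([
--         a
--         for a in dict_a.items()
--         for b in dict_b.items()
--         if a == b
--     ])
--     return True if match_items == dict_a else False
-- ===== SOURCE B (Python) =====
-- def dict_items_in_dict(dict_a: dict, dict_b: dict):
--     # Merge dict_a over dict_b: equal to dict_b iff dict_a adds/changes nothing.
--     return {**dict_b, **dict_a} == dict_b
-- ===== Notes on version B (the rewrite author's own statement) =====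
-- stated objective: simpler
-- what changed: B replaces A's nested pair-by-pair comprehension plus reconstructed-dict comparison with a single merge {**dict_b, **dict_a} compared against dict_b.
import Mathlib
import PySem

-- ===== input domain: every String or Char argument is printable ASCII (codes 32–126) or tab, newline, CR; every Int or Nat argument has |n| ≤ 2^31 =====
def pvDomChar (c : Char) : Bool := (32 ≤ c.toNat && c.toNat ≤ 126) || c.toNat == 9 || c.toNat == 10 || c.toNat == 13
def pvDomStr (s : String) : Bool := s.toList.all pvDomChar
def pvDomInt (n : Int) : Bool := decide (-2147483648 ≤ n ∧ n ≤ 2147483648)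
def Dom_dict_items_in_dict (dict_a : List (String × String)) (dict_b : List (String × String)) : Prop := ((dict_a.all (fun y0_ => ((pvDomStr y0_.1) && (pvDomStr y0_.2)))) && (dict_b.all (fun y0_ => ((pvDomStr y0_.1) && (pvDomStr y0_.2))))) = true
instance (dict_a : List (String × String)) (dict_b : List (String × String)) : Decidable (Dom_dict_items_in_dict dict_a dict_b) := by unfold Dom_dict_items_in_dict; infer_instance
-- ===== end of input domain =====

-- B replaces A's nested item-by-item scan and reconstructed dict with one merge {**dict_b, **dict_a} compared to dict_b (simpler, asymptotically fewer comparisons).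


-- Python's `d == e` on dicts: same size and every item of d found (by key, same value) in e.
def pyDictEq (d e : PySem.Dict String String) : Bool :=
  (d.size == e.size) && d.items.all (fun p => e.get? p.1 == some p.2)

-- ===== PORT A =====
def dict_items_in_dict (dict_a : List (String × String)) (dict_b : List (String × String)) : Bool :=
  let match_items := PySem.Dict.ofList
    (dict_a.flatMap (fun a => (dict_b.filter (fun b => a == b)).map (fun _ => a)))
  if pyDictEq match_items (PySem.Dict.mk dict_a) then true else false

-- ===== PORT B =====
def dict_items_in_dict_alt (dict_a : List (String × String)) (dict_b : List (String × String)) : Bool :=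
  pyDictEq ((PySem.Dict.mk dict_b).update dict_a) (PySem.Dict.mk dict_b)

-- ===== PRECONDITION & SPEC =====
-- Pre_ only requires each association list to be a valid representation of a Python
-- dict (no duplicate keys) — every actual input of A satisfies this by construction.
def Pre_dict_items_in_dict (dict_a : List (String × String)) (dict_b : List (String × String)) : Prop :=
  (dict_a.map Prod.fst).Nodup ∧ (dict_b.map Prod.fst).Nodup
instance (dict_a : List (String × String)) (dict_b : List (String × String)) : Decidable (Pre_dict_items_in_dict dict_a dict_b) := by unfold Pre_dict_items_in_dict; infer_instance

def pvWitness_dict_items_in_dict : (List (String × String)) × (List (String × String)) :=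
  ([("a", "1")], [("a", "1"), ("b", "2")])

def Spec_dict_items_in_dict (dict_a : List (String × String)) (dict_b : List (String × String)) (out : Bool) : Prop := out = dict_items_in_dict_alt dict_a dict_b
instance (dict_a : List (String × String)) (dict_b : List (String × String)) (out : Bool) : Decidable (Spec_dict_items_in_dict dict_a dict_b out) := by unfold Spec_dict_items_in_dict; infer_instance

-- ===== CLAIM (what is proved, stated in full; the proofs are below) =====
def Claim_equal_dict_items_in_dict : Prop := ∀ (dict_a : List (String × String)) (dict_b : List (String × String)), Dom_dict_items_in_dict dict_a dict_b → Pre_dict_items_in_dict dict_a dict_b → Spec_dict_items_in_dict dict_a dict_b (dict_items_in_dict dict_a dict_b)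

-- ===== LEMMAS AND PROOFS =====

-- Filtering a nodup list for (bool-)equality with p yields [p] or [].
theorem filter_eq_of_nodup (l : List (String × String)) (hl : l.Nodup) (p : String × String) :
    l.filter (fun q => p == q) = if p ∈ l then [p] else [] := by
  induction l with
  | nil => simp
  | cons x t ih =>
    rcases List.nodup_cons.mp hl with ⟨hx, ht⟩
    by_cases h : p = x
    · subst h
      simp [List.filter_cons, ih ht, hx]
    · simp [List.filter_cons, ih ht, h, Ne.symm h, beq_iff_eq]

-- The comprehension list of A, under nodup keys of dict_b, is a filter of dict_a.
theorem flatMap_eq_filter (dict_a dict_b : List (String × String))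
    (hb : (dict_b.map Prod.fst).Nodup) :
    dict_a.flatMap (fun a => (dict_b.filter (fun b => a == b)).map (fun _ => a))
      = dict_a.filter (fun p => decide (p ∈ dict_b)) := by
  have hbn : dict_b.Nodup := hb.of_map
  induction dict_a with
  | nil => rfl
  | cons x t ih =>
    rw [List.flatMap_cons, List.filter_cons, ih]
    rw [filter_eq_of_nodup dict_b hbn x]
    by_cases h : x ∈ dict_b <;> simp [h]

theorem get?_mk_of_mem (l : List (String × String)) (h : (l.map Prod.fst).Nodup)
    {p : String × String} (hp : p ∈ l) :
    (PySem.Dict.mk l).get? p.1 = some p.2 := by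
  exact PySem.Dict.get?_of_mem_items (d := PySem.Dict.mk l) hp h

theorem get?_update_of_not_mem (a : List (String × String)) (k : String) :
    ∀ (d : PySem.Dict String String), k ∉ a.map Prod.fst →
      (d.update a).get? k = d.get? k := by
  induction a with
  | nil => intro d _; rfl
  | cons x t ih =>
    intro d h
    simp only [List.map_cons, List.mem_cons, not_or] at h
    show ((d.insert x.1 x.2).update t).get? k = d.get? k
    rw [ih _ h.2, PySem.Dict.get?_insert_of_ne _ _ h.1]

theorem get?_update_of_mem (a : List (String × String)) :
    ∀ (d : PySem.Dict String String), (a.map Prod.fst).Nodup →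
      ∀ p ∈ a, (d.update a).get? p.1 = some p.2 := by
  induction a with
  | nil => intro d _ p hp; cases hp
  | cons x t ih =>
    intro d ha p hp
    rcases List.nodup_cons.mp ha with ⟨hx, ht⟩
    rcases List.mem_cons.mp hp with h | h
    · subst h
      show ((d.insert p.1 p.2).update t).get? p.1 = some p.2
      rw [get?_update_of_not_mem t p.1 _ hx, PySem.Dict.get?_insert_self]
    · exact ih (d.insert x.1 x.2) ht p h

-- Inserting an item already present (under nodup keys) is the identity.
theorem insert_self_of_mem (l : List (String × String)) (h : (l.map Prod.fst).Nodup)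
    {p : String × String} (hp : p ∈ l) :
    (PySem.Dict.mk l).insert p.1 p.2 = PySem.Dict.mk l := by
  have hc : (PySem.Dict.mk l).contains p.1 = true := by
    rw [PySem.Dict.contains_eq_decide_mem_keys]
    simp only [PySem.Dict.keys, decide_eq_true_eq]
    exact List.mem_map.mpr ⟨p, hp, rfl⟩
  apply PySem.Dict.ext
  rw [PySem.Dict.items_insert_of_contains _ _ hc]
  show l.map (fun q => if q.1 == p.1 then (p.1, p.2) else q) = l
  have hcong : ∀ q ∈ l, (fun q => if q.1 == p.1 then (p.1, p.2) else q) q = q := by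
    intro q hq
    by_cases hqp : q.1 = p.1
    · have hqe : q = p := by
        have h1 : (PySem.Dict.mk l).get? q.1 = some q.2 := get?_mk_of_mem l h hq
        have h2 : (PySem.Dict.mk l).get? p.1 = some p.2 := get?_mk_of_mem l h hp
        rw [hqp, h2] at h1
        exact Prod.ext hqp (Option.some.inj h1.symm)
      simp [hqp, hqe]
    · simp [hqp]
  simpa using List.map_congr_left hcong

theorem update_eq_self (l : List (String × String)) (h : (l.map Prod.fst).Nodup) :
    ∀ (a : List (String × String)), (∀ p ∈ a, p ∈ l) →
      (PySem.Dict.mk l).update a = PySem.Dict.mk l := by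
  intro a
  induction a with
  | nil => intro _; rfl
  | cons x t ih =>
    intro ha
    show (((PySem.Dict.mk l).insert x.1 x.2).update t) = PySem.Dict.mk l
    rw [insert_self_of_mem l h (ha x (by simp)), ih (fun p hp => ha p (by simp [hp]))]

theorem pyDictEq_refl_nodup (l : List (String × String)) (h : (l.map Prod.fst).Nodup) :
    pyDictEq (PySem.Dict.mk l) (PySem.Dict.mk l) = true := by
  unfold pyDictEq
  simp only [beq_self_eq_true, Bool.true_and, List.all_eq_true]
  intro p hp
  simp [get?_mk_of_mem l h hp]

-- B-side characterization: the merge equals dict_b iff every item of dict_a is in dict_b.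
theorem alt_eq_all (dict_a dict_b : List (String × String))
    (ha : (dict_a.map Prod.fst).Nodup) (hb : (dict_b.map Prod.fst).Nodup) :
    dict_items_in_dict_alt dict_a dict_b = dict_a.all (fun p => decide (p ∈ dict_b)) := by
  by_cases h : ∀ p ∈ dict_a, p ∈ dict_b
  · have hAll : dict_a.all (fun p => decide (p ∈ dict_b)) = true := by
      simpa [List.all_eq_true] using h
    rw [hAll]
    unfold dict_items_in_dict_alt
    rw [update_eq_self dict_b hb dict_a h]
    exact pyDictEq_refl_nodup dict_b hb
  · push_neg at h
    rcases h with ⟨p, hpa, hpb⟩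
    have hfalse : dict_a.all (fun p => decide (p ∈ dict_b)) = false := by
      simp only [List.all_eq_false]
      exact ⟨p, hpa, by simp [hpb]⟩
    rw [hfalse]
    unfold dict_items_in_dict_alt
    by_cases hk : p.1 ∈ dict_b.map Prod.fst
    · -- key present with a different value: the items.all conjunct fails
      have hget : ((PySem.Dict.mk dict_b).update dict_a).get? p.1 = some p.2 :=
        get?_update_of_mem dict_a _ ha p hpa
      have hmem : (p.1, p.2) ∈ ((PySem.Dict.mk dict_b).update dict_a).items :=
        PySem.Dict.mem_items_of_get?_eq_some _ hget
      have hbne : (PySem.Dict.mk dict_b).get? p.1 ≠ some p.2 := by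
        intro hc
        exact hpb (by simpa using PySem.Dict.mem_items_of_get?_eq_some _ hc)
      unfold pyDictEq
      apply Bool.and_eq_false_iff.mpr
      right
      simp only [List.all_eq_false]
      exact ⟨(p.1, p.2), hmem, by simpa using hbne⟩
    · -- new key: sizes differ
      have hkeys : ((PySem.Dict.mk dict_b).update dict_a).keys
          = PySem.Set.update (PySem.Dict.mk dict_b).keys (dict_a.map Prod.fst) :=
        PySem.Dict.keys_foldl_insert_key dict_a Prod.fst (fun _ x => x.2) _
      have hlen : ((PySem.Dict.mk dict_b).update dict_a).size ≠ (PySem.Dict.mk dict_b).size := by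
        have h1 : ((PySem.Dict.mk dict_b).update dict_a).size
            = ((PySem.Dict.mk dict_b).update dict_a).keys.length := by
          simp [PySem.Dict.size, PySem.Dict.keys]
        rw [h1, hkeys, PySem.Set.update_eq_append_filter, List.length_append]
        have hpos : 0 < ((PySem.Set.ofList (dict_a.map Prod.fst)).filter
            (fun y => !(PySem.Set.contains (PySem.Dict.mk dict_b).keys y))).length := by
          apply List.length_pos_of_mem (a := p.1)
          apply List.mem_filter.mpr
          refine ⟨(PySem.Set.mem_ofList _ _).mpr (List.mem_map.mpr ⟨p, hpa, rfl⟩), ?_⟩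
          simp only [PySem.Set.contains_eq_listContains, Bool.not_eq_eq_eq_not, Bool.not_true]
          simp only [List.contains_eq_mem, decide_eq_false_iff_not]
          simpa [PySem.Dict.keys] using hk
        have hsz : (PySem.Dict.mk dict_b).size = (PySem.Dict.mk dict_b).keys.length := by
          simp [PySem.Dict.size, PySem.Dict.keys]
        omega
      unfold pyDictEq
      apply Bool.and_eq_false_iff.mpr
      left
      simpa using hlen

-- A-side characterization.
theorem a_eq_all (dict_a dict_b : List (String × String))
    (ha : (dict_a.map Prod.fst).Nodup) (hb : (dict_b.map Prod.fst).Nodup) :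
    dict_items_in_dict dict_a dict_b = dict_a.all (fun p => decide (p ∈ dict_b)) := by
  unfold dict_items_in_dict
  rw [flatMap_eq_filter dict_a dict_b hb]
  set F := dict_a.filter (fun p => decide (p ∈ dict_b)) with hF
  have hFsub : F.Sublist dict_a := List.filter_sublist
  have hFnd : (F.map Prod.fst).Nodup := (hFsub.map Prod.fst).nodup ha
  have hofL : PySem.Dict.ofList F = PySem.Dict.mk F := by
    show PySem.Dict.empty.update F = PySem.Dict.mk F
    apply PySem.Dict.ext
    have hfresh := PySem.Dict.items_foldl_insert_fresh (l := F) (k := Prod.fst) (v := Prod.snd)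
      (d := PySem.Dict.empty) (fun a _ => rfl) hFnd
    simpa [PySem.Dict.update] using hfresh
  rw [hofL]
  have hall : F.all (fun p => ((PySem.Dict.mk dict_a).get? p.1 == some p.2)) = true := by
    simp only [List.all_eq_true]
    intro p hp
    simp [get?_mk_of_mem dict_a ha (hFsub.mem hp)]
  have hsize : (((PySem.Dict.mk F).size == (PySem.Dict.mk dict_a).size) : Bool)
      = dict_a.all (fun p => decide (p ∈ dict_b)) := by
    show (F.length == dict_a.length) = _
    by_cases h : ∀ p ∈ dict_a, p ∈ dict_b
    · have hfe : F = dict_a := List.filter_eq_self.mpr (by simpa using fun p hp => h p hp)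
      have hAll : dict_a.all (fun p => decide (p ∈ dict_b)) = true := by
        simp only [List.all_eq_true]
        intro p hp
        simpa using h p hp
      rw [hfe, hAll]
      simp
    · push_neg at h
      rcases h with ⟨p, hpa, hpb⟩
      have hlt : F.length < dict_a.length := by
        rcases Nat.lt_or_ge F.length dict_a.length with hl | hg
        · exact hl
        · exfalso
          have hfe : F = dict_a := hFsub.eq_of_length_le hg
          have := List.filter_eq_self.mp hfe p hpa
          simp [hpb] at this
      have hf : dict_a.all (fun p => decide (p ∈ dict_b)) = false := by
        simp only [List.all_eq_false]
        exact ⟨p, hpa, by simp [hpb]⟩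
      rw [hf]
      simp only [beq_eq_false_iff_ne, ne_eq]
      omega
  have hEq : pyDictEq (PySem.Dict.mk F) (PySem.Dict.mk dict_a)
      = dict_a.all (fun p => decide (p ∈ dict_b)) := by
    unfold pyDictEq
    rw [hall, Bool.and_true]
    exact hsize
  show (if pyDictEq (PySem.Dict.mk F) (PySem.Dict.mk dict_a) = true then true else false)
      = dict_a.all (fun p => decide (p ∈ dict_b))
  rw [hEq]
  cases dict_a.all (fun p => decide (p ∈ dict_b)) <;> simp

-- ===== VERDICT (by name: the statement is the Claim_ definition above) =====
theorem dict_items_in_dict_spec : Claim_equal_dict_items_in_dict := by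
  intro dict_a dict_b _ hpre
  unfold Spec_dict_items_in_dict
  rw [a_eq_all dict_a dict_b hpre.1 hpre.2, alt_eq_all dict_a dict_b hpre.1 hpre.2]
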